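-- pv_equiv track=rewrite | github.com/Gadisa21/Competitive_Programming | onboard/Week_1/distance-between-bus-stops.py | distanceBetweenBusStops
-- ===== SOURCE A (Python) =====
-- def distanceBetweenBusStops(distance, start, destination):
--     if start == destination:
--         return 0
--
--     total_distance = sum(distance)
--     clockwise_distance = 0
--     cur_stop = start
--
--     while cur_stop != destination:
--         clockwise_distance += distance[cur_stop]
--         cur_stop = (cur_stop + 1) % len(distance)
--
--     return min(clockwise_distance, total_distance - clockwise_distance)
-- ===== SOURCE B (Python) =====
-- def distanceBetweenBusStops(distance, start, destination):
--     if start == destination: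
--         return 0
--     n = len(distance)
--     s, d = start % n, destination % n
--     if s <= d:
--         arc = sum(distance[s:d])
--     else:
--         arc = sum(distance[s:]) + sum(distance[:d])
--     return min(arc, sum(distance) - arc)
-- ===== Notes on version B (the rewrite author's own statement) =====
-- stated objective: simpler
-- what changed: Replaces A's stop-by-stop modular while-loop walk with two contiguous slice sums (reduce start/destination modulo the route length, sum one wrap-free arc, take min(arc, total - arc)); the bulk sum() over slices removes the per-stop interpreted indexing/mod stepping.
import Mathlib
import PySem

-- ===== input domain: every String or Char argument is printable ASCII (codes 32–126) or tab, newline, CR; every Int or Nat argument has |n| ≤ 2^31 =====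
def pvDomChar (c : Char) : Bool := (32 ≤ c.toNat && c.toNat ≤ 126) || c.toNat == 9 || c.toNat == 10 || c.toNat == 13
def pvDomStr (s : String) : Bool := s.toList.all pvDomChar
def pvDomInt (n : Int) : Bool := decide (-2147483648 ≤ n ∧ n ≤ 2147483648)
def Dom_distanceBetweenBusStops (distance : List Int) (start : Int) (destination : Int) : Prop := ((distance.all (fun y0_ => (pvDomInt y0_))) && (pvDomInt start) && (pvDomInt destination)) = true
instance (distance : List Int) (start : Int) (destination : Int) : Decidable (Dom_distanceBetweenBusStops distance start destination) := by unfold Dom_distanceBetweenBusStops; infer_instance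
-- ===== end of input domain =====

-- B replaces A's index-by-index modular walk by two contiguous slice sums (simpler; no loop over stops).

-- ===== PORT A =====
-- the while loop of A; fuel bounds the number of iterations (n+1 suffices on every input
-- A terminates on); the fuel-0 and IndexError (pyGet? = none) branches are unreachable under Pre_
def dbbsLoop (distance : List Int) (destination : Int) : Nat → Int → Int → Int
  | 0, cw, _ => cw
  | fuel+1, cw, cur =>
    if cur = destination then cw
    else
      match PySem.List.pyGet? distance cur with
      | none => cw
      | some x => dbbsLoop distance destination fuel (cw + x) (PySem.Int.mod (cur + 1) (distance.length : Int))

def distanceBetweenBusStops (distance : List Int) (start : Int) (destination : Int) : Int :=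
  if start = destination then 0
  else
    let total := distance.sum
    let cw := dbbsLoop distance destination (distance.length + 1) 0 start
    min cw (total - cw)

-- ===== PORT B =====
def distanceBetweenBusStops_alt (distance : List Int) (start : Int) (destination : Int) : Int :=
  if start = destination then 0
  else
    let n : Int := distance.length
    let s := PySem.Int.mod start n
    let d := PySem.Int.mod destination n
    let arc :=
      if s ≤ d then (PySem.List.slice distance (some s) (some d)).sum
      else (PySem.List.slice distance (some s) none).sum + (PySem.List.slice distance none (some d)).sum
    min arc (distance.sum - arc)

-- ===== PRECONDITION & SPEC =====
-- Pre_ is exactly where the Python A returns: with start ≠ destination, A raises IndexError on an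
-- empty list or a start index outside [-len, len), and loops forever when destination ∉ [0, len).
def Pre_distanceBetweenBusStops (distance : List Int) (start : Int) (destination : Int) : Prop :=
  start = destination ∨
    (distance ≠ [] ∧ -(distance.length : Int) ≤ start ∧ start < (distance.length : Int) ∧
      0 ≤ destination ∧ destination < (distance.length : Int))
instance (distance : List Int) (start : Int) (destination : Int) : Decidable (Pre_distanceBetweenBusStops distance start destination) := by unfold Pre_distanceBetweenBusStops; infer_instance

def pvWitness_distanceBetweenBusStops : List Int × Int × Int := ([3, 1, 2], 0, 2)


def Spec_distanceBetweenBusStops (distance : List Int) (start : Int) (destination : Int) (out : Int) : Prop := out = distanceBetweenBusStops_alt distance start destination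
instance (distance : List Int) (start : Int) (destination : Int) (out : Int) : Decidable (Spec_distanceBetweenBusStops distance start destination out) := by unfold Spec_distanceBetweenBusStops; infer_instance

-- ===== CLAIM (what is proved, stated in full; the proofs are below) =====
def Claim_equal_distanceBetweenBusStops : Prop := ∀ (distance : List Int) (start : Int) (destination : Int), Dom_distanceBetweenBusStops distance start destination → Pre_distanceBetweenBusStops distance start destination → Spec_distanceBetweenBusStops distance start destination (distanceBetweenBusStops distance start destination)


-- ===== LEMMAS AND PROOFS =====

-- proof-side view of B's arc: the clockwise slice sum from stop s to stop d
def arcSum (distance : List Int) (s d : Nat) : Int :=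
  if s ≤ d then ((distance.drop s).take (d - s)).sum
  else (distance.drop s).sum + (distance.take d).sum

-- number of clockwise steps from cur to d on a circle of n stops (mod-free for omega)
def stepsTo (n d cur : Nat) : Nat := if cur ≤ d then d - cur else d + n - cur

lemma arcSum_self (distance : List Int) (s : Nat) : arcSum distance s s = 0 := by
  simp [arcSum]

lemma arcSum_step (distance : List Int) (s d : Nat)
    (hs : s < distance.length) (hd : d < distance.length) (hne : s ≠ d) :
    arcSum distance s d = distance[s] + arcSum distance ((s + 1) % distance.length) d := by
  have hcons : distance.drop s = distance[s] :: distance.drop (s + 1) :=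
    List.drop_eq_getElem_cons hs
  rcases lt_or_gt_of_ne hne with hlt | hgt
  · -- s < d : contiguous slice shrinks on the left
    rw [Nat.mod_eq_of_lt (by omega : s + 1 < distance.length)]
    simp only [arcSum, if_pos (by omega : s ≤ d), if_pos (by omega : s + 1 ≤ d), hcons]
    have : d - s = (d - (s + 1)) + 1 := by omega
    rw [this, List.take_succ_cons, List.sum_cons]
  · -- s > d : wrap-around arc
    by_cases hend : s + 1 = distance.length
    · have hdropS : distance.drop s = [distance[s]] := by
        rw [hcons, hend, List.drop_length]
      rw [hend, Nat.mod_self]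
      simp only [arcSum, if_neg (by omega : ¬ s ≤ d), if_pos (Nat.zero_le d), hdropS,
        List.drop_zero, Nat.sub_zero]
      simp
    · rw [Nat.mod_eq_of_lt (by omega : s + 1 < distance.length)]
      simp only [arcSum, if_neg (by omega : ¬ s ≤ d), if_neg (by omega : ¬ s + 1 ≤ d)]
      rw [hcons, List.sum_cons]; ring

-- one full lap starting at stop s sums the whole list
lemma arcSum_circle (distance : List Int) (s : Nat) (hs : s < distance.length) :
    distance[s] + arcSum distance ((s + 1) % distance.length) s = distance.sum := by
  have hcons : distance.drop s = distance[s] :: distance.drop (s + 1) :=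
    List.drop_eq_getElem_cons hs
  have hsplit : distance.sum = (distance.take s).sum + (distance.drop s).sum := by
    rw [← List.sum_append, List.take_append_drop]
  by_cases hend : s + 1 = distance.length
  · have hdropS : distance.drop s = [distance[s]] := by
      rw [hcons, hend, List.drop_length]
    rw [hend, Nat.mod_self]
    simp only [arcSum, if_pos (Nat.zero_le s), List.drop_zero, Nat.sub_zero]
    rw [hsplit, hdropS]
    simp [add_comm]
  · rw [Nat.mod_eq_of_lt (by omega : s + 1 < distance.length)]
    simp only [arcSum, if_neg (by omega : ¬ s + 1 ≤ s)]
    rw [hsplit, hcons, List.sum_cons]; ring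

lemma pyGet?_of_lt (distance : List Int) (s : Nat) (hs : s < distance.length) :
    PySem.List.pyGet? distance (s : Int) = some distance[s] := by
  simp [PySem.List.pyGet?, PySem.List.pyIdx?, hs]

lemma mod_cast_succ (distance : List Int) (s : Nat) (h : 0 < distance.length) :
    PySem.Int.mod ((s : Int) + 1) (distance.length : Int)
      = (((s + 1) % distance.length : Nat) : Int) := by
  have : ((s : Int) + 1) = ((s + 1 : Nat) : Int) := by push_cast; ring
  rw [this, PySem.Int.mod_natCast]

-- the loop from a canonical stop cur ∈ [0,n) accumulates exactly the clockwise arc sum to d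
lemma dbbsLoop_eq (distance : List Int) (d : Nat) (hd : d < distance.length) :
    ∀ (k : Nat) (cur : Nat) (cw : Int) (fuel : Nat), cur < distance.length →
      stepsTo distance.length d cur = k → k ≤ fuel →
      dbbsLoop distance (d : Int) fuel cw (cur : Int) = cw + arcSum distance cur d := by
  intro k
  induction k with
  | zero =>
    intro cur cw fuel hcur hk _
    have hcd : cur = d := by unfold stepsTo at hk; split_ifs at hk <;> omega
    subst hcd
    rw [arcSum_self]
    cases fuel with
    | zero => simp [dbbsLoop]
    | succ f => simp [dbbsLoop]
  | succ k ih =>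
    intro cur cw fuel hcur hk hfuel
    have hn : 0 < distance.length := by omega
    have hne : cur ≠ d := by
      rintro rfl; unfold stepsTo at hk; simp at hk
    obtain ⟨f, rfl⟩ : ∃ f, fuel = f + 1 := ⟨fuel - 1, by omega⟩
    simp only [dbbsLoop, if_neg (show ¬ ((cur : Int)) = (d : Int) by exact_mod_cast hne),
      pyGet?_of_lt distance cur hcur, mod_cast_succ distance cur hn]
    have hsteps : stepsTo distance.length d ((cur + 1) % distance.length) = k := by
      by_cases hw : cur + 1 = distance.length
      · rw [hw, Nat.mod_self]
        unfold stepsTo at hk ⊢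
        split_ifs at hk ⊢ <;> omega
      · rw [Nat.mod_eq_of_lt (by omega)]
        unfold stepsTo at hk ⊢
        split_ifs at hk ⊢ <;> omega
    rw [ih ((cur + 1) % distance.length) (cw + distance[cur]) f
      (Nat.mod_lt _ hn) hsteps (by omega)]
    rw [arcSum_step distance cur d hcur hd hne]; ring

-- B's arc expression is arcSum of the canonical stops
lemma alt_arc_eq (distance : List Int) (s d : Nat) :
    (if (s : Int) ≤ (d : Int) then (PySem.List.slice distance (some (s : Int)) (some (d : Int))).sum
     else (PySem.List.slice distance (some (s : Int)) none).sum
          + (PySem.List.slice distance none (some (d : Int))).sum)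
    = arcSum distance s d := by
  by_cases h : s ≤ d
  · rw [if_pos (by exact_mod_cast h), PySem.List.slice_natCast]
    simp [arcSum, h]
  · rw [if_neg (by exact_mod_cast h), PySem.List.slice_from_natCast,
      PySem.List.slice_to_natCast]
    simp [arcSum, h]

-- ===== VERDICT (by name: the statement is the Claim_ definition above) =====
theorem distanceBetweenBusStops_spec : Claim_equal_distanceBetweenBusStops := by
  intro distance start destination _ hpre
  unfold Spec_distanceBetweenBusStops
  by_cases heq : start = destination
  · simp [distanceBetweenBusStops, distanceBetweenBusStops_alt, heq]
  · rcases hpre with h | ⟨hne, hlo, hhi, hdlo, hdhi⟩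
    · exact absurd h heq
    have hn : 0 < distance.length := by
      cases distance with
      | nil => exact absurd rfl hne
      | cons a l => simp
    -- canonical destination
    obtain ⟨d, rfl⟩ : ∃ d : Nat, destination = (d : Int) := ⟨destination.toNat, by omega⟩
    have hd : d < distance.length := by exact_mod_cast hdhi
    have hmodd : PySem.Int.mod (d : Int) (distance.length : Int) = (d : Int) := by
      rw [PySem.Int.mod_natCast, Nat.mod_eq_of_lt hd]
    unfold distanceBetweenBusStops distanceBetweenBusStops_alt
    rw [if_neg heq, if_neg heq]
    dsimp only
    by_cases hstart : 0 ≤ start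
    · -- start already a canonical stop index
      obtain ⟨s, rfl⟩ : ∃ s : Nat, start = (s : Int) := ⟨start.toNat, by omega⟩
      have hs : s < distance.length := by exact_mod_cast hhi
      have hsd : s ≠ d := fun h => heq (by exact_mod_cast h)
      have hmods : PySem.Int.mod (s : Int) (distance.length : Int) = (s : Int) := by
        rw [PySem.Int.mod_natCast, Nat.mod_eq_of_lt hs]
      have hfuel : stepsTo distance.length d s ≤ distance.length + 1 := by
        unfold stepsTo; split_ifs <;> omega
      rw [dbbsLoop_eq distance d hd (stepsTo distance.length d s) s 0 (distance.length + 1)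
        hs rfl hfuel, hmods, hmodd, alt_arc_eq distance s d, zero_add]
    · -- negative start: Python's distance[start] wraps; unfold the first iteration by hand
      set s : Nat := (start + (distance.length : Int)).toNat with hsdef
      have hs : s < distance.length := by omega
      have hstart_eq : start = (s : Int) - (distance.length : Int) := by omega
      have hposlen : (0 : Int) < (distance.length : Int) := by exact_mod_cast hn
      -- first iteration of the loop
      have hget : PySem.List.pyGet? distance start = some distance[s] := by
        simp only [PySem.List.pyGet?, PySem.List.pyIdx?]
        rw [if_neg (by omega : ¬ (0 : Int) ≤ start),
          if_pos (show -(distance.length : Int) ≤ start from hlo)]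
        have h1 : distance.length - (-start).toNat = s := by omega
        rw [h1]
        simp [List.getElem?_eq_getElem hs]
      have hmod1 : PySem.Int.mod (start + 1) (distance.length : Int)
          = (((s + 1) % distance.length : Nat) : Int) := by
        rw [PySem.Int.mod_eq_emod_of_pos hposlen]
        by_cases hw : s + 1 = distance.length
        · have h0 : start + 1 = 0 := by omega
          rw [h0, hw, Nat.mod_self]
          simp
        · have h1 : start + 1 = (((s + 1 : Nat)) : Int) + (distance.length : Int) * (-1) := by
            push_cast; omega
          rw [h1, Int.add_mul_emod_self_left, Nat.mod_eq_of_lt (by omega),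
            Int.emod_eq_of_lt (by positivity) (by exact_mod_cast (by omega : s + 1 < distance.length))]
      have hmods : PySem.Int.mod start (distance.length : Int) = (s : Int) := by
        rw [PySem.Int.mod_eq_emod_of_pos hposlen]
        have h1 : start = ((s : Nat) : Int) + (distance.length : Int) * (-1) := by
          omega
        rw [h1, Int.add_mul_emod_self_left,
          Int.emod_eq_of_lt (by positivity) (by exact_mod_cast hs)]
      have hDne : ¬ start = (d : Int) := by omega
      have hfuel : stepsTo distance.length d ((s + 1) % distance.length) ≤ distance.length := by
        unfold stepsTo
        have := Nat.mod_lt (s + 1) (show 0 < distance.length by omega)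
        split_ifs <;> omega
      simp only [dbbsLoop, if_neg hDne, hget, hmod1]
      rw [dbbsLoop_eq distance d hd (stepsTo distance.length d ((s + 1) % distance.length))
        ((s + 1) % distance.length) (0 + distance[s]) distance.length
        (Nat.mod_lt _ (by omega)) rfl hfuel]
      rw [hmods, hmodd, alt_arc_eq distance s d, zero_add]
      by_cases hsd : s = d
      · -- full lap: A's clockwise sum is the whole route, B's arc is 0; the two mins coincide
        subst hsd
        rw [arcSum_circle distance s hs, arcSum_self]
        simp [min_comm]
      · rw [← arcSum_step distance s d hs hd hsd]
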